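-- pv_equiv track=rewrite | github.com/Susadi11/dementia_backend | src/features/conversational_ai/nlp/processors/syntax_analyzer.py | count_repetitions
-- ===== SOURCE A (Python) =====
-- from typing import List, Dict, Tuple, Optional
--
-- def count_repetitions(tokens: List[str], window_size: int = 5) -> int:
--     """
--     Count word repetitions in sliding windows.
--
--     Args:
--         tokens: List of tokens
--         window_size: Size of sliding window
--
--     Returns:
--         Number of repetitions found
--     """
--     if len(tokens) < 2:
--         return 0
--
--     repetition_count = 0
--     for i in range(len(tokens) - 1):
--         if tokens[i].lower() == tokens[i + 1].lower():
--             repetition_count += 1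
--
--     # Also check within windows
--     for i in range(len(tokens) - window_size):
--         window = [t.lower() for t in tokens[i:i+window_size]]
--         seen = set()
--         for token in window:
--             if token in seen:
--                 repetition_count += 1
--             seen.add(token)
--
--     return repetition_count
-- ===== SOURCE B (Python) =====
-- def count_repetitions(tokens, window_size=5):
--     """Sliding frequency counter: O(n) instead of rescanning each window."""
--     if len(tokens) < 2:
--         return 0
--     low = [t.lower() for t in tokens]
--     rep = sum(1 for a, b in zip(low, low[1:]) if a == b)
--     n = len(low)
--     if window_size >= 1 and n > window_size:
--         freq = {}
--         distinct = 0
--         for j in range(window_size):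
--             c = freq.get(low[j], 0)
--             if c == 0:
--                 distinct += 1
--             freq[low[j]] = c + 1
--         rep += window_size - distinct
--         for i in range(1, n - window_size):
--             out = low[i - 1]
--             freq[out] -= 1
--             if freq[out] == 0:
--                 distinct -= 1
--             inc = low[i + window_size - 1]
--             c = freq.get(inc, 0)
--             if c == 0:
--                 distinct += 1
--             freq[inc] = c + 1
--             rep += window_size - distinct
--     return rep
-- ===== Notes on version B (the rewrite author's own statement) =====
-- stated objective: faster
-- what changed: Replaces A's per-window rescan (lowercasing each window and counting duplicates with a fresh set per window) by one lowercase pass plus a sliding frequency dictionary with a running distinct count, so per-window duplicates = window_size - distinct in O(1) amortized per window.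
-- outside the precondition, e.g. on count_repetitions(['a', 'a', 'a'], -1): A returns 3, B returns 2; on count_repetitions(['a', 'b'], -1): A returns 0, B returns 0
import Mathlib
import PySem

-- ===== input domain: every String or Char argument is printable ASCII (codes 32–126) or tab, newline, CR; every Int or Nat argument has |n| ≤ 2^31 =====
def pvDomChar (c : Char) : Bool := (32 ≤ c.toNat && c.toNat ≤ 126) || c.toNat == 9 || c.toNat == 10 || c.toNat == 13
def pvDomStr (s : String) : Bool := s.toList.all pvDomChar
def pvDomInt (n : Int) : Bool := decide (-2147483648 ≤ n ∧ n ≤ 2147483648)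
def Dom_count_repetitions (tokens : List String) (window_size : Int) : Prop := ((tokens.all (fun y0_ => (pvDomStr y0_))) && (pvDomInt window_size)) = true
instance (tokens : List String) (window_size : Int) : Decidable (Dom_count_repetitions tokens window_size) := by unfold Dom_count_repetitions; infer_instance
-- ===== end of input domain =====

-- B replaces A's per-window rescan (each window lowercased, dedup-counted from scratch) by a single
-- sliding frequency dictionary with a running distinct count (per-window duplicates = window_size − distinct),
-- lowercasing once up front: O(n) instead of O(n·w) window work.

-- ===== PORT A =====
-- inner loop body of A's per-window duplicate count: 'if token in seen: count += 1; seen.add(token)'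
def pvSeenStep (st : PySem.Set String × Int) (token : String) : PySem.Set String × Int :=
  (st.1.add token, if st.1.contains token then st.2 + 1 else st.2)

def count_repetitions (tokens : List String) (window_size : Int) : Int :=
  if (tokens.length : Int) < 2 then 0
  else
    let rep1 : Int :=
      (PySem.List.pyRange 0 ((tokens.length : Int) - 1) 1).foldl
        (fun acc i =>
          if PySem.Str.lower (PySem.List.pyGetD tokens i "") ==
             PySem.Str.lower (PySem.List.pyGetD tokens (i + 1) "") then acc + 1 else acc) 0
    (PySem.List.pyRange 0 ((tokens.length : Int) - window_size) 1).foldl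
      (fun acc i =>
        let window := (PySem.List.slice tokens (some i) (some (i + window_size))).map PySem.Str.lower
        (window.foldl pvSeenStep (PySem.Set.empty, acc)).2)
      rep1

-- ===== PORT B =====
-- body of B's initial-window build: 'c = freq.get(low[j], 0); if c == 0: distinct += 1; freq[low[j]] = c + 1'
def pvAddStep (low : List String) (st : PySem.Dict String Int × Int) (j : Int) : PySem.Dict String Int × Int :=
  let t := PySem.List.pyGetD low j ""
  let c := st.1.getD t 0
  (st.1.insert t (c + 1), if c == 0 then st.2 + 1 else st.2)

-- body of B's sliding loop: evict low[i-1], admit low[i+window_size-1], add window_size - distinct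
def pvSlideStep (low : List String) (window_size : Int)
    (st : PySem.Dict String Int × Int × Int) (i : Int) : PySem.Dict String Int × Int × Int :=
  let outT := PySem.List.pyGetD low (i - 1) ""
  let f1 := st.1.insert outT (st.1.getD outT 0 - 1)
  let d1 := if f1.getD outT 0 == 0 then st.2.1 - 1 else st.2.1
  let inT := PySem.List.pyGetD low (i + window_size - 1) ""
  let c := f1.getD inT 0
  let f2 := f1.insert inT (c + 1)
  let d2 := if c == 0 then d1 + 1 else d1
  (f2, d2, st.2.2 + (window_size - d2))

def count_repetitions_alt (tokens : List String) (window_size : Int) : Int :=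
  if (tokens.length : Int) < 2 then 0
  else
    let low := tokens.map PySem.Str.lower
    let rep : Int := (low.zip (low.drop 1)).foldl (fun a p => if p.1 == p.2 then a + 1 else a) 0
    let n : Int := (low.length : Int)
    if 1 ≤ window_size ∧ window_size < n then
      let init := (PySem.List.pyRange 0 window_size 1).foldl (pvAddStep low) (PySem.Dict.empty, 0)
      let st := (PySem.List.pyRange 1 (n - window_size) 1).foldl (pvSlideStep low window_size)
        (init.1, init.2, rep + (window_size - init.2))
      st.2.2
    else rep

-- ===== PRECONDITION & SPEC =====
-- Pre_ excludes negative window_size (malformed input): there Python's negative slice stop in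
-- tokens[i:i+window_size] wraps to the end of the list, so A's "windows" are accidental head-slices.
def Pre_count_repetitions (_tokens : List String) (window_size : Int) : Prop := 0 ≤ window_size
instance (tokens : List String) (window_size : Int) : Decidable (Pre_count_repetitions tokens window_size) := by unfold Pre_count_repetitions; infer_instance

def pvWitness_count_repetitions : List String × Int := (["go", "Go", "now", "go", "stop"], 3)

def Spec_count_repetitions (tokens : List String) (window_size : Int) (out : Int) : Prop := out = count_repetitions_alt tokens window_size
instance (tokens : List String) (window_size : Int) (out : Int) : Decidable (Spec_count_repetitions tokens window_size out) := by unfold Spec_count_repetitions; infer_instance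

-- ===== CLAIM (what is proved, stated in full; the proofs are below) =====
def Claim_equal_count_repetitions : Prop := ∀ (tokens : List String) (window_size : Int), Dom_count_repetitions tokens window_size → Pre_count_repetitions tokens window_size → Spec_count_repetitions tokens window_size (count_repetitions tokens window_size)

-- ===== LEMMAS AND PROOFS =====

-- lowercased token list, window starting at k, distinct count of a window (proof-side abbreviations)
def pvLow (tokens : List String) : List String := tokens.map PySem.Str.lower
def pvWin (L : List String) (w k : Nat) : List String := (L.drop k).take w
def pvD (L : List String) (w k : Nat) : Nat := (pvWin L w k).toFinset.card

theorem pvSetLen (l : List String) : (PySem.Set.ofList l).length = l.toFinset.card := by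
  have hn := PySem.Set.nodup_ofList l
  have h1 : (PySem.Set.ofList l).toFinset = l.toFinset := by
    ext x
    simp [List.mem_toFinset, PySem.Set.mem_ofList]
  rw [← List.toFinset_card_of_nodup hn, h1]

theorem pvSeenFold (l : List String) (s : PySem.Set String) (a : Int) :
    (l.foldl pvSeenStep (s, a)).2 + ((PySem.Set.update s l).length : Int)
      = a + l.length + s.length := by
  induction l generalizing s a with
  | nil => simp [PySem.Set.update_nil]
  | cons t rest ih =>
    rw [List.foldl_cons]
    by_cases h : t ∈ s
    · have hc : PySem.Set.contains s t = true := by simp [h]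
      have hadd : PySem.Set.add s t = s := PySem.Set.add_of_mem h
      simp only [pvSeenStep, hc, hadd]
      rw [PySem.Set.update_cons, hadd] at *
      have := ih s (a + 1)
      simp only [List.length_cons]
      push_cast at this ⊢
      omega
    · have hc : PySem.Set.contains s t = false := by simp [h]
      have hadd : PySem.Set.add s t = s ++ [t] := PySem.Set.add_of_not_mem h
      simp only [pvSeenStep, hc, Bool.false_eq_true, if_false, hadd]
      rw [PySem.Set.update_cons, hadd]
      have := ih (s ++ [t]) a
      simp only [List.length_cons, List.length_append, List.length_cons, List.length_nil] at this ⊢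
      push_cast at this ⊢
      omega

theorem pvSeenFold_empty (l : List String) (a : Int) :
    (l.foldl pvSeenStep (PySem.Set.empty, a)).2 = a + l.length - l.toFinset.card := by
  have h := pvSeenFold l PySem.Set.empty a
  have he : (PySem.Set.empty : PySem.Set String).update l = PySem.Set.ofList l := PySem.Set.update_nil_left l
  rw [he] at h
  rw [show (l.toFinset.card : Int) = ((PySem.Set.ofList l).length : Int) by rw [pvSetLen]]
  simp only [show (PySem.Set.empty : PySem.Set String).length = 0 from rfl, Nat.cast_zero, add_zero] at h
  omega

theorem pvZipPairs (L : List String) :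
    L.zip (L.drop 1) = (List.range (L.length - 1)).map (fun k => (L.getD k "", L.getD (k+1) "")) := by
  apply List.ext_getElem
  · simp [List.length_zip]
  · intro i h1 h2
    have hlen : i < L.length - 1 := by simpa using h2
    have hi : i < L.length := by omega
    have hi1 : i + 1 < L.length := by omega
    have hd : i < (L.drop 1).length := by simp; omega
    simp only [List.getElem_zip, List.getElem_map, List.getElem_range]
    rw [List.getElem_drop]
    rw [List.getD_eq_getElem _ _ hi, List.getD_eq_getElem _ _ hi1]
    simp [Nat.add_comm]

theorem pvAdjA (L : List String) :
    (PySem.List.pyRange 0 ((L.length : Int) - 1) 1).foldl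
      (fun acc i =>
        if PySem.List.pyGetD L i "" == PySem.List.pyGetD L (i + 1) "" then acc + 1 else acc) 0
    = ((L.zip (L.drop 1)).countP (fun p => p.1 == p.2) : Int) := by
  rw [PySem.List.pyRange_one, List.foldl_map]
  have ht : (((L.length : Int) - 1) - 0).toNat = L.length - 1 := by omega
  rw [ht]
  have hcong : ∀ (acc : Int), ∀ k ∈ List.range (L.length - 1),
      (fun acc (k : Nat) =>
        if PySem.List.pyGetD L ((0:Int) + k) "" == PySem.List.pyGetD L (((0:Int) + k) + 1) "" then acc + 1 else acc) acc k
      = (fun acc (k : Nat) => if L.getD k "" == L.getD (k+1) "" then acc + 1 else acc) acc k := by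
    intro acc k hk
    simp only [List.mem_range] at hk
    have h1 : (0:Int) + k = ((k:Nat):Int) := by omega
    have h2 : ((k:Nat):Int) + 1 = (((k+1:Nat)):Int) := by push_cast; omega
    simp only [h1, h2, PySem.List.pyGetD_natCast]
  rw [PySem.List.foldl_congr_mem _ _ _ _ hcong]
  rw [PySem.List.foldl_count_if (fun k => L.getD k "" == L.getD (k+1) "") (List.range (L.length - 1)) 0]
  rw [pvZipPairs L, List.countP_map]
  rw [zero_add]
  rfl

theorem pvCardSnoc (l : List String) (t : String) :
    (l ++ [t]).toFinset.card = l.toFinset.card + (if t ∈ l then 0 else 1) := by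
  rw [List.toFinset_append]
  simp only [List.toFinset_cons, List.toFinset_nil, insert_empty_eq]
  rw [Finset.union_singleton]
  by_cases h : t ∈ l
  · rw [Finset.card_insert_of_mem (by simpa using h)]
    simp [h]
  · rw [Finset.card_insert_of_notMem (by simpa using h)]
    simp [h]

theorem pvInitInv (L : List String) (w : Nat) (hw : w ≤ L.length) :
    (∀ x, (((PySem.List.pyRange 0 (w : Int) 1).foldl (pvAddStep L) (PySem.Dict.empty, 0)).1).getD x 0
        = ((L.take w).count x : Int))
    ∧ ((PySem.List.pyRange 0 (w : Int) 1).foldl (pvAddStep L) (PySem.Dict.empty, 0)).2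
        = ((L.take w).toFinset.card : Int) := by
  induction w with
  | zero =>
    rw [PySem.List.pyRange_one_eq_nil (by omega)]
    simp [PySem.Dict.getD_empty]
  | succ j ih =>
    have hj : j ≤ L.length := by omega
    have hjlt : j < L.length := by omega
    obtain ⟨ihf, ihd⟩ := ih hj
    have hsplit : PySem.List.pyRange 0 ((j+1 : Nat) : Int) 1
        = PySem.List.pyRange 0 (j : Int) 1 ++ [(j : Int)] := by
      rw [show (((j+1 : Nat)) : Int) = (j : Int) + 1 by push_cast; ring]
      exact PySem.List.pyRange_one_succ_right (by omega)
    rw [hsplit, List.foldl_append]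
    set st := (PySem.List.pyRange 0 (j : Int) 1).foldl (pvAddStep L) (PySem.Dict.empty, 0) with hst
    have hget : PySem.List.pyGetD L ((j : Nat) : Int) "" = L[j] := by
      rw [PySem.List.pyGetD_natCast, List.getD_eq_getElem _ _ hjlt]
    have htake : L.take (j+1) = L.take j ++ [L[j]] := by
      rw [List.take_add_one, List.getElem?_eq_getElem hjlt]
      rfl
    have hc : st.1.getD L[j] 0 = ((L.take j).count L[j] : Int) := ihf _
    constructor
    · intro x
      simp only [List.foldl_cons, List.foldl_nil, pvAddStep, hget]
      rw [PySem.Dict.getD_insert]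
      rw [htake, List.count_append]
      by_cases hx : x = L[j]
      · subst hx
        rw [if_pos rfl, hc]
        simp
      · rw [if_neg hx, ihf x]
        have h0 : List.count x [L[j]] = 0 := by
          simp [Ne.symm hx]
        rw [h0]
        simp
    · simp only [List.foldl_cons, List.foldl_nil, pvAddStep, hget]
      rw [hc]
      have hmem : (((L.take j).count L[j] : Int) == 0) = (decide (L[j] ∉ L.take j)) := by
        by_cases hm : L[j] ∈ L.take j
        · have h0 : (L.take j).count L[j] ≠ 0 := fun h => (List.count_eq_zero.mp h) hm
          simp [hm]
          omega
        · simp [List.count_eq_zero.mpr hm, hm]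
      rw [hmem, htake, pvCardSnoc, ihd]
      by_cases hm : L[j] ∈ L.take j
      · simp [hm]
      · simp [hm]

theorem pvCardCons (l : List String) (t : String) :
    (t :: l).toFinset.card = l.toFinset.card + (if t ∈ l then 0 else 1) := by
  rw [List.toFinset_cons]
  by_cases h : t ∈ l
  · rw [Finset.card_insert_of_mem (by simpa using h)]; simp [h]
  · rw [Finset.card_insert_of_notMem (by simpa using h)]; simp [h]

theorem pvWinCons (L : List String) (w m : Nat) (hw : 1 ≤ w) (hm : m < L.length) :
    pvWin L w m = L[m] :: (L.drop (m+1)).take (w-1) := by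
  obtain ⟨v, rfl⟩ : ∃ v, w = v + 1 := ⟨w - 1, by omega⟩
  unfold pvWin
  have h1 : L.drop m = L[m] :: L.drop (m+1) := List.drop_eq_getElem_cons hm
  rw [h1, List.take_succ_cons]
  simp

theorem pvWinSnoc (L : List String) (w m : Nat) (hw : 1 ≤ w) (hm : m + 1 + w ≤ L.length) :
    pvWin L w (m+1) = (L.drop (m+1)).take (w-1) ++ [L[m+w]] := by
  obtain ⟨v, rfl⟩ : ∃ v, w = v + 1 := ⟨w - 1, by omega⟩
  unfold pvWin
  have hv : v < (L.drop (m+1)).length := by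
    rw [List.length_drop]; omega
  rw [List.take_add_one, List.getElem?_eq_getElem hv]
  have h2 : (L.drop (m+1))[v] = L[m + (v+1)] := by
    rw [List.getElem_drop]
    congr 1
    omega
  simp [h2]

theorem pvSlideInv (L : List String) (w : Nat) (hw : 1 ≤ w) (hN : w < L.length)
    (f0 : PySem.Dict String Int) (d0 a0 rep : Int)
    (hf0 : ∀ x, f0.getD x 0 = ((pvWin L w 0).count x : Int))
    (hd0 : d0 = (pvD L w 0 : Int))
    (ha0 : a0 = rep + ((w : Int) - pvD L w 0)) :
    ∀ m : Nat, m ≤ L.length - w - 1 →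
      (∀ x, (((List.range m).map (fun (k : Nat) => (1 : Int) + (k : Int))).foldl (pvSlideStep L (w : Int)) (f0, d0, a0)).1.getD x 0
          = ((pvWin L w m).count x : Int))
      ∧ (((List.range m).map (fun (k : Nat) => (1 : Int) + (k : Int))).foldl (pvSlideStep L (w : Int)) (f0, d0, a0)).2.1
          = (pvD L w m : Int)
      ∧ (((List.range m).map (fun (k : Nat) => (1 : Int) + (k : Int))).foldl (pvSlideStep L (w : Int)) (f0, d0, a0)).2.2
          = rep + ((List.range (m+1)).map (fun t => (w : Int) - pvD L w t)).sum := by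
  intro m
  induction m with
  | zero =>
    intro _
    simp only [List.range_zero, List.map_nil, List.foldl_nil]
    refine ⟨hf0, hd0, ?_⟩
    simp [ha0]
  | succ m ih =>
    intro hm1
    have hm : m ≤ L.length - w - 1 := by omega
    obtain ⟨ihf, ihd, iha⟩ := ih hm
    rw [List.range_succ, List.map_append, List.foldl_append]
    set st := ((List.range m).map (fun (k : Nat) => (1 : Int) + (k : Int))).foldl (pvSlideStep L (w : Int)) (f0, d0, a0) with hst
    -- index bounds
    have hmN : m < L.length := by omega
    have hmwN : m + w < L.length := by omega
    have hfit : m + 1 + w ≤ L.length := by omega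
    set mid := (L.drop (m+1)).take (w-1) with hmid
    have hwc : pvWin L w m = L[m] :: mid := pvWinCons L w m hw hmN
    have hws : pvWin L w (m+1) = mid ++ [L[m+w]] := pvWinSnoc L w m hw hfit
    -- the two indexed elements
    have hout : PySem.List.pyGetD L (((1:Int) + m) - 1) "" = L[m] := by
      rw [show ((1:Int) + m) - 1 = ((m : Nat) : Int) by ring]
      rw [PySem.List.pyGetD_natCast, List.getD_eq_getElem _ _ hmN]
    have hin : PySem.List.pyGetD L (((1:Int) + m) + (w : Int) - 1) "" = L[m+w] := by
      rw [show ((1:Int) + m) + (w : Int) - 1 = (((m + w : Nat)) : Int) by push_cast; ring]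
      rw [PySem.List.pyGetD_natCast, List.getD_eq_getElem _ _ hmwN]
    simp only [List.map_cons, List.map_nil, List.foldl_cons, List.foldl_nil, pvSlideStep, hout, hin]
    -- counts after eviction
    have hf1 : ∀ x, (st.1.insert L[m] (st.1.getD L[m] 0 - 1)).getD x 0 = (mid.count x : Int) := by
      intro x
      rw [PySem.Dict.getD_insert]
      by_cases hx : x = L[m]
      · subst hx
        rw [if_pos rfl, ihf, hwc, List.count_cons]
        simp
      · rw [if_neg hx, ihf, hwc, List.count_cons]
        simp [Ne.symm hx]
    have hcount0 : ∀ (c : Nat), (((c : Int)) == 0) = decide (c = 0) := by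
      intro c
      by_cases h : c = 0 <;> simp [h]

    -- distinct after eviction
    have hd1 : (if (st.1.insert L[m] (st.1.getD L[m] 0 - 1)).getD L[m] 0 == 0 then st.2.1 - 1 else st.2.1)
        = (mid.toFinset.card : Int) := by
      rw [hf1, hcount0, ihd]
      have : pvD L w m = (L[m] :: mid).toFinset.card := by rw [pvD, hwc]
      rw [this, pvCardCons]
      by_cases hmem : L[m] ∈ mid
      · have : mid.count L[m] ≠ 0 := fun h => (List.count_eq_zero.mp h) hmem
        simp [hmem, this]
      · simp [hmem, List.count_eq_zero.mpr hmem]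
    -- distinct after admission
    have hd2 : (if (st.1.insert L[m] (st.1.getD L[m] 0 - 1)).getD L[m+w] 0 == 0
          then (if (st.1.insert L[m] (st.1.getD L[m] 0 - 1)).getD L[m] 0 == 0 then st.2.1 - 1 else st.2.1) + 1
          else (if (st.1.insert L[m] (st.1.getD L[m] 0 - 1)).getD L[m] 0 == 0 then st.2.1 - 1 else st.2.1))
        = (pvD L w (m+1) : Int) := by
      rw [hd1, hf1, hcount0, pvD, hws, pvCardSnoc]
      by_cases hmem : L[m+w] ∈ mid
      · have : mid.count L[m+w] ≠ 0 := fun h => (List.count_eq_zero.mp h) hmem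
        simp [hmem, this]
      · simp [hmem, List.count_eq_zero.mpr hmem]
    refine ⟨?_, ?_, ?_⟩
    · intro x
      rw [PySem.Dict.getD_insert]
      by_cases hx : x = L[m+w]
      · subst hx
        rw [if_pos rfl, hf1, hws, List.count_append]
        simp
      · rw [if_neg hx, hf1, hws, List.count_append]
        have h0 : List.count x [L[m+w]] = 0 := by simp [Ne.symm hx]
        rw [h0]
        simp
    · exact hd2
    · rw [hd2, iha, List.range_succ (n := m+1), List.map_append, List.sum_append]
      simp [pvD]
      ring

theorem pvWindowA (tokens : List String) (w : Nat) (hw : w < tokens.length) (r : Int) :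
    (PySem.List.pyRange 0 ((tokens.length : Int) - (w : Int)) 1).foldl
      (fun acc i =>
        ((((PySem.List.slice tokens (some i) (some (i + (w : Int)))).map PySem.Str.lower).foldl
            pvSeenStep (PySem.Set.empty, acc)).2))
      r
    = r + ((List.range (tokens.length - w)).map
        (fun k => (w : Int) - pvD (pvLow tokens) w k)).sum := by
  rw [PySem.List.pyRange_one]
  rw [show (((tokens.length : Int) - (w : Int)) - 0).toNat = tokens.length - w by omega]
  rw [List.foldl_map]
  have hcong : ∀ (acc : Int), ∀ k ∈ List.range (tokens.length - w),
      (fun acc (k : Nat) =>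
        ((((PySem.List.slice tokens (some ((0:Int) + k)) (some (((0:Int) + k) + (w : Int)))).map PySem.Str.lower).foldl
            pvSeenStep (PySem.Set.empty, acc)).2)) acc k
      = (fun acc (k : Nat) => acc + ((w : Int) - pvD (pvLow tokens) w k)) acc k := by
    intro acc k hk
    simp only [List.mem_range] at hk
    have h0 : (0:Int) + (k : Int) = ((k : Nat) : Int) := by omega
    simp only [h0, PySem.List.slice_natCast_add]
    have hwl : (tokens.drop k).take w = pvWin tokens w k := rfl
    have hmap : ((tokens.drop k).take w).map PySem.Str.lower = pvWin (pvLow tokens) w k := by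
      unfold pvWin pvLow
      rw [List.map_take, List.map_drop]
    rw [hmap, pvSeenFold_empty]
    have hlen : (pvWin (pvLow tokens) w k).length = w := by
      unfold pvWin pvLow
      rw [List.length_take, List.length_drop, List.length_map]
      omega
    rw [hlen]
    unfold pvD
    ring
  rw [PySem.List.foldl_congr_mem _ _ _ _ hcong]
  exact PySem.List.foldl_add _ _ _

-- ===== VERDICT (by name: the statement is the Claim_ definition above) =====
theorem count_repetitions_spec : Claim_equal_count_repetitions := by
  unfold Claim_equal_count_repetitions
  intro tokens ws hdom hpre
  unfold Pre_count_repetitions at hpre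
  unfold Spec_count_repetitions count_repetitions count_repetitions_alt
  by_cases h2 : (tokens.length : Int) < 2
  · rw [if_pos h2, if_pos h2]
  · rw [if_neg h2, if_neg h2]
    dsimp only
    -- identify the two adjacent-pair counts
    have hmapget : ∀ i : Int, PySem.Str.lower (PySem.List.pyGetD tokens i "")
        = PySem.List.pyGetD (pvLow tokens) i "" := by
      intro i
      unfold pvLow
      have h := PySem.List.pyGetD_map PySem.Str.lower tokens i ""
      rw [show PySem.Str.lower "" = "" from rfl] at h
      exact h.symm
    have hlenL : (pvLow tokens).length = tokens.length := by unfold pvLow; exact List.length_map ..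
    have hadjA : (PySem.List.pyRange 0 ((tokens.length : Int) - 1) 1).foldl
        (fun acc i =>
          if PySem.Str.lower (PySem.List.pyGetD tokens i "") ==
             PySem.Str.lower (PySem.List.pyGetD tokens (i + 1) "") then acc + 1 else acc) 0
        = (((pvLow tokens).zip ((pvLow tokens).drop 1)).countP (fun p => p.1 == p.2) : Int) := by
      have := pvAdjA (pvLow tokens)
      rw [hlenL] at this
      rw [← this]
      apply PySem.List.foldl_congr_mem
      intro acc i _
      rw [hmapget i, hmapget (i+1)]
    have hadjB : ((tokens.map PySem.Str.lower).zip ((tokens.map PySem.Str.lower).drop 1)).foldl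
        (fun a p => if p.1 == p.2 then a + 1 else a) 0
        = (((pvLow tokens).zip ((pvLow tokens).drop 1)).countP (fun p => p.1 == p.2) : Int) := by
      have h := PySem.List.foldl_count_if (fun (p : String × String) => p.1 == p.2)
        ((tokens.map PySem.Str.lower).zip ((tokens.map PySem.Str.lower).drop 1)) 0
      rw [zero_add] at h
      exact h
    set adj : Int := (((pvLow tokens).zip ((pvLow tokens).drop 1)).countP (fun p => p.1 == p.2) : Int) with hadj
    by_cases hG : 1 ≤ ws ∧ ws < ((tokens.map PySem.Str.lower).length : Int)
    · -- main case
      rw [if_pos hG]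
      obtain ⟨hg1, hg2⟩ := hG
      rw [List.length_map] at hg2
      obtain ⟨w, rfl⟩ : ∃ w : Nat, ws = (w : Int) := ⟨ws.toNat, (Int.toNat_of_nonneg hpre).symm⟩
      have hw1 : 1 ≤ w := by omega
      have hwN : w < tokens.length := by omega
      rw [hadjA, pvWindowA tokens w hwN]
      -- B side
      have hinit := pvInitInv (pvLow tokens) w (by omega)
      have hwin0 : pvWin (pvLow tokens) w 0 = (pvLow tokens).take w := by
        unfold pvWin
        rw [List.drop_zero]
      have hD0 : pvD (pvLow tokens) w 0 = ((pvLow tokens).take w).toFinset.card := by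
        unfold pvD
        rw [hwin0]
      have hrange : PySem.List.pyRange 1 (((tokens.map PySem.Str.lower).length : Int) - (w : Int)) 1
          = (List.range (tokens.length - w - 1)).map (fun (k : Nat) => (1 : Int) + (k : Int)) := by
        rw [PySem.List.pyRange_one]
        rw [List.length_map]
        rw [show (((tokens.length : Int) - (w : Int)) - 1).toNat = tokens.length - w - 1 by omega]
      have hslide := pvSlideInv (pvLow tokens) w hw1 (by rw [hlenL]; omega)
        ((PySem.List.pyRange 0 ((w : Nat) : Int) 1).foldl (pvAddStep (tokens.map PySem.Str.lower)) (PySem.Dict.empty, 0)).1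
        ((PySem.List.pyRange 0 ((w : Nat) : Int) 1).foldl (pvAddStep (tokens.map PySem.Str.lower)) (PySem.Dict.empty, 0)).2
        (adj + ((w : Int) -
          ((PySem.List.pyRange 0 ((w : Nat) : Int) 1).foldl (pvAddStep (tokens.map PySem.Str.lower)) (PySem.Dict.empty, 0)).2))
        adj
        (by
          intro x
          rw [show pvAddStep (tokens.map PySem.Str.lower) = pvAddStep (pvLow tokens) from rfl]
          rw [(hinit).1 x, hwin0])
        (by
          rw [show pvAddStep (tokens.map PySem.Str.lower) = pvAddStep (pvLow tokens) from rfl]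
          rw [(hinit).2, hD0])
        (by
          rw [show pvAddStep (tokens.map PySem.Str.lower) = pvAddStep (pvLow tokens) from rfl]
          rw [(hinit).2, hD0])
        (tokens.length - w - 1) (by simp [hlenL])
      rw [hadjB, hrange]
      rw [show pvSlideStep (tokens.map PySem.Str.lower) ((w : Nat) : Int) = pvSlideStep (pvLow tokens) ((w : Nat) : Int) from rfl]
      rw [hslide.2.2]
      rw [show tokens.length - w - 1 + 1 = tokens.length - w by omega]
    · -- degenerate window cases: window loop contributes nothing
      rw [if_neg hG]
      rw [hadjA, hadjB]
      rw [not_and_or, not_lt, not_le] at hG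
      rw [List.length_map] at hG
      by_cases hz : ws = 0
      · subst hz
        have hcong0 : ∀ (acc : Int), ∀ i ∈ PySem.List.pyRange 0 ((tokens.length : Int) - 0) 1,
            (fun acc (i : Int) =>
              ((((PySem.List.slice tokens (some i) (some (i + 0))).map PySem.Str.lower).foldl
                  pvSeenStep (PySem.Set.empty, acc)).2)) acc i
            = (fun acc (_ : Int) => acc) acc i := by
          intro acc i _
          have hnil : PySem.List.slice tokens (some i) (some i) = [] := by
            apply List.eq_nil_of_length_eq_zero
            rw [PySem.List.length_slice]
            omega
          simp [hnil]
        rw [PySem.List.foldl_congr_mem _ _ _ _ hcong0, List.foldl_fixed]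
      · have hge : ((tokens.length : Int)) ≤ ws := by
          rcases lt_or_ge ws 1 with h | h
          · omega
          · rcases hG with h1 | h1
            · omega
            · exact h1
        rw [PySem.List.pyRange_one_eq_nil (by omega), List.foldl_nil]
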